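-- pv_equiv track=rewrite | github.com/2900xt/cp-files | test.py | brute_solve
-- ===== SOURCE A (Python) =====
-- import itertools
--
-- def brute_solve(d, l, r):
--     n = len(d)
--     for assignment in itertools.product([0,1], repeat=d.count(-1)):
--         d_copy = d[:]
--         it = iter(assignment)
--         for i in range(n):
--             if d_copy[i] == -1:
--                 d_copy[i] = next(it)
--         h = 0
--         ok = True
--         for i in range(n):
--             h += d_copy[i]
--             if not (l[i] <= h <= r[i]):
--                 ok = False
--                 break
--         if ok:
--             return d_copy
--     return None
-- ===== SOURCE B (Python) =====
-- def brute_solve(d, l, r):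
--     n = len(d)
--     # Backward pass: feas[i] = (lo, hi) interval of prefix-sum values entering
--     # position i that admit a valid completion of positions i..n-1, or None if empty.
--     feas_rev = []
--     for i in range(n - 1, -1, -1):
--         if feas_rev:
--             nxt = feas_rev[-1]
--             if nxt is None:
--                 lo, hi = 1, 0
--             else:
--                 lo, hi = max(l[i], nxt[0]), min(r[i], nxt[1])
--         else:
--             lo, hi = l[i], r[i]
--         if lo > hi:
--             feas_rev.append(None)
--         elif d[i] == -1:
--             feas_rev.append((lo - 1, hi))
--         else:
--             feas_rev.append((lo - d[i], hi - d[i]))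
--     feas = feas_rev[::-1]
--     if n == 0:
--         return []
--     if feas[0] is None or not (feas[0][0] <= 0 <= feas[0][1]):
--         return None
--     # Forward greedy: at each unknown take 0 if it stays feasible, else 1.
--     out = []
--     h = 0
--     for i in range(n):
--         if d[i] == -1:
--             if l[i] <= h <= r[i] and (i + 1 == n or (feas[i + 1] is not None
--                     and feas[i + 1][0] <= h <= feas[i + 1][1])):
--                 v = 0
--             else:
--                 v = 1
--             out.append(v)
--             h += v
--         else:
--             out.append(d[i])
--             h += d[i]
--     return out
-- ===== Notes on version B (the rewrite author's own statement) =====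
-- stated objective: alternative
-- what changed: Replaces the enumeration of all 0/1 assignments (exponential in the number of -1 entries) by a backward interval-propagation pass computing the feasible prefix-sum range at each position, then a forward greedy pass that picks the smallest feasible digit at each unknown.
-- outside the precondition, e.g. on brute_solve([2, 0], [0, 0], [0]): A returns None, B raises IndexError
import Mathlib
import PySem

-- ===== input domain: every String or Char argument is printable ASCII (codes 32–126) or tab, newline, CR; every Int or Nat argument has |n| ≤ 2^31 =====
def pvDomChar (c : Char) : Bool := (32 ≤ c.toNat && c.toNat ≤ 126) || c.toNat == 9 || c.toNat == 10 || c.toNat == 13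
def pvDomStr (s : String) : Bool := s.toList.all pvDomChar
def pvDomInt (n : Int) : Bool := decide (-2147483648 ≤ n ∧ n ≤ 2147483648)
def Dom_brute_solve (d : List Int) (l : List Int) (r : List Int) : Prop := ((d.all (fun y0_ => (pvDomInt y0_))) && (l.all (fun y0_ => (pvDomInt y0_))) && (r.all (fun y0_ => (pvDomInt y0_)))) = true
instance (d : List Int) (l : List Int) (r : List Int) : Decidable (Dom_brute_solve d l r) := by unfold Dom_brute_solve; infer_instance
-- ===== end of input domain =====

-- B replaces A's enumeration of all 0/1 assignments by a backward
-- interval-propagation pass plus a forward greedy pass (objective: alternative).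

-- ===== PORT A =====
-- itertools.product([0,1], repeat=k) in lexicographic order
def prodLists : Nat → List (List Int)
  | 0 => [[]]
  | k + 1 => ([0, 1] : List Int).flatMap (fun v => (prodLists k).map (fun a => v :: a))

-- substitute successive assignment values for the -1 entries of d (the 'for i in range(n): if d_copy[i] == -1' loop)
def fill : List Int → List Int → List Int
  | [], _ => []
  | x :: xs, vs =>
      if x = -1 then
        match vs with
        | v :: vs' => v :: fill xs vs'
        | [] => x :: fill xs []          -- unreachable: the assignment has exactly d.count (-1) values
      else x :: fill xs vs

-- the 'h += d_copy[i]; if not (l[i] <= h <= r[i])' validation loop; returns false where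
-- Python would raise IndexError on a too-short l/r (excluded by Pre_brute_solve)
def checkA : Int → List Int → List Int → List Int → Bool
  | _, [], _, _ => true
  | h, x :: dc, li :: ls, ri :: rs =>
      if li ≤ h + x ∧ h + x ≤ ri then checkA (h + x) dc ls rs else false
  | _, _ :: _, _, _ => false

-- the outer 'for assignment in itertools.product(...)' loop with its early return
def tryAll (d l r : List Int) : List (List Int) → Option (List Int)
  | [] => none
  | a :: rest =>
      let dc := fill d a
      if checkA 0 dc l r then some dc else tryAll d l r rest

def brute_solve (d : List Int) (l : List Int) (r : List Int) : Option (List Int) :=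
  tryAll d l r (prodLists (d.count (-1)))

-- ===== PORT B =====
-- backward pass of Source B: feasB d l r = list of intervals (some (lo,hi)) or none (empty);
-- entry i = set of prefix-sum values entering position i that admit a completion
def feasB : List Int → List Int → List Int → List (Option (Int × Int))
  | [], _, _ => []
  | x :: ds, li :: ls, ri :: rs =>
      let rest := feasB ds ls rs
      let lohi : Int × Int :=
        match rest with
        | [] => (li, ri)
        | none :: _ => (1, 0)
        | some (nlo, nhi) :: _ => (max li nlo, min ri nhi)
      let cur : Option (Int × Int) :=
        if lohi.1 > lohi.2 then none
        else if x = -1 then some (lohi.1 - 1, lohi.2)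
        else some (lohi.1 - x, lohi.2 - x)
      cur :: rest
  | _ :: _, _, _ => []                    -- IndexError in Python (excluded by Pre_brute_solve)

-- membership of h in the head interval of a feasibility list ([] = past the end = anything goes)
def inNext (h : Int) : List (Option (Int × Int)) → Bool
  | [] => true
  | none :: _ => false
  | some (lo, hi) :: _ => decide (lo ≤ h ∧ h ≤ hi)

-- forward greedy pass of Source B
def forwardB : Int → List Int → List Int → List Int → List (Option (Int × Int)) → List Int
  | _, [], _, _, _ => []
  | h, x :: ds, li :: ls, ri :: rs, fs =>
      if x = -1 then
        let v : Int := if li ≤ h ∧ h ≤ ri ∧ inNext h fs.tail then 0 else 1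
        v :: forwardB (h + v) ds ls rs fs.tail
      else x :: forwardB (h + x) ds ls rs fs.tail
  | _, _ :: _, _, _, _ => []              -- IndexError in Python (excluded by Pre_brute_solve)

def brute_solve_alt (d : List Int) (l : List Int) (r : List Int) : Option (List Int) :=
  let fs := feasB d l r
  match fs with
  | [] => some []                          -- n = 0
  | none :: _ => none
  | some (lo, hi) :: _ =>
      if lo ≤ 0 ∧ 0 ≤ hi then some (forwardB 0 d l r fs) else none

-- ===== PRECONDITION & SPEC =====
-- Pre_ excludes inputs where l or r is shorter than d: there A generally raises
-- IndexError (and on a few of them A happens to return None by breaking out of the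
-- validation loop early, while B's backward pass, which reads every l[i]/r[i],
-- raises IndexError).
def Pre_brute_solve (d : List Int) (l : List Int) (r : List Int) : Prop :=
  d.length ≤ l.length ∧ d.length ≤ r.length
instance (d : List Int) (l : List Int) (r : List Int) : Decidable (Pre_brute_solve d l r) := by unfold Pre_brute_solve; infer_instance

def pvWitness_brute_solve : List Int × List Int × List Int :=
  ([-1, 0, -1], [0, 0, 1], [1, 1, 2])

def Spec_brute_solve (d : List Int) (l : List Int) (r : List Int) (out : Option (List Int)) : Prop := out = brute_solve_alt d l r
instance (d : List Int) (l : List Int) (r : List Int) (out : Option (List Int)) : Decidable (Spec_brute_solve d l r out) := by unfold Spec_brute_solve; infer_instance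

-- ===== CLAIM (what is proved, stated in full; the proofs are below) =====
def Claim_equal_brute_solve : Prop := ∀ (d : List Int) (l : List Int) (r : List Int), Dom_brute_solve d l r → Pre_brute_solve d l r → Spec_brute_solve d l r (brute_solve d l r)

-- ===== LEMMAS AND PROOFS =====

-- tryAll is find? + map fill
theorem tryAll_eq_find? (d l r : List Int) (as : List (List Int)) :
    tryAll d l r as = (as.find? (fun a => checkA 0 (fill d a) l r)).map (fill d) := by
  induction as with
  | nil => rfl
  | cons a rest ih =>
      simp only [tryAll, List.find?]
      by_cases hc : checkA 0 (fill d a) l r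
      · simp [hc]
      · simp [hc, ih]

-- the interval-bounds pair feasB builds from l[i], r[i] and the next feasibility entry
def lohiOf (li ri : Int) (rest : List (Option (Int × Int))) : Int × Int :=
  match rest with
  | [] => (li, ri)
  | none :: _ => (1, 0)
  | some (nlo, nhi) :: _ => (max li nlo, min ri nhi)

theorem feasB_cons (x : Int) (ds : List Int) (li : Int) (ls : List Int) (ri : Int) (rs : List Int) :
    feasB (x :: ds) (li :: ls) (ri :: rs) =
      (if (lohiOf li ri (feasB ds ls rs)).1 > (lohiOf li ri (feasB ds ls rs)).2 then none
       else if x = -1 then some ((lohiOf li ri (feasB ds ls rs)).1 - 1, (lohiOf li ri (feasB ds ls rs)).2)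
       else some ((lohiOf li ri (feasB ds ls rs)).1 - x, (lohiOf li ri (feasB ds ls rs)).2 - x))
      :: feasB ds ls rs := by
  simp only [feasB, lohiOf]

-- membership in the built interval = the local bound plus feasibility of the next state
theorem lohi_mem (li ri z : Int) (rest : List (Option (Int × Int))) :
    ((lohiOf li ri rest).1 ≤ z ∧ z ≤ (lohiOf li ri rest).2)
      ↔ (li ≤ z ∧ z ≤ ri ∧ inNext z rest = true) := by
  match rest with
  | [] => simp [lohiOf, inNext]
  | none :: _ => simp [lohiOf, inNext]; omega
  | some (nlo, nhi) :: _ => simp [lohiOf, inNext]; omega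

-- fill on a fixed entry
theorem fill_cons_ne (x : Int) (xs vs : List Int) (hx : x ≠ -1) :
    fill (x :: xs) vs = x :: fill xs vs := by
  simp [fill, hx]

theorem fill_cons_neg (xs : List Int) (v : Int) (vs : List Int) :
    fill ((-1) :: xs) (v :: vs) = v :: fill xs vs := by
  simp [fill]

theorem map_cons_comm (x : Int) (g : List Int → List Int) (o : Option (List Int)) :
    o.map (fun a => x :: g a) = (o.map g).map (fun t => x :: t) := by
  cases o <;> rfl

-- MAIN: A's search over a suffix equals B's greedy over the same suffix
theorem main_lemma (d : List Int) :
    ∀ (l r : List Int) (h : Int), d.length ≤ l.length → d.length ≤ r.length →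
    ((prodLists (d.count (-1))).find? (fun a => checkA h (fill d a) l r)).map (fill d)
    = if inNext h (feasB d l r) = true then some (forwardB h d l r (feasB d l r)) else none := by
  induction d with
  | nil =>
      intro l r h _ _
      simp [prodLists, fill, checkA, feasB, inNext, forwardB]
  | cons x ds ih =>
      intro l r h hl hr
      match l, r with
      | [], _ => simp at hl
      | _ :: _, [] => simp at hr
      | li :: ls, ri :: rs =>
        simp only [List.length_cons, Nat.add_le_add_iff_right] at hl hr
        have ih' := fun (h' : Int) => ih ls rs h' hl hr
        rw [feasB_cons]
        generalize hrest : feasB ds ls rs = rest at ih' ⊢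
        have bnd : ∀ z : Int, ((lohiOf li ri rest).1 ≤ z ∧ z ≤ (lohiOf li ri rest).2)
            ↔ (li ≤ z ∧ z ≤ ri ∧ inNext z rest = true) := fun z => lohi_mem li ri z rest
        rcases hp : lohiOf li ri rest with ⟨lo, hi⟩
        simp only [hp] at bnd
        dsimp only
        by_cases hx : x = -1
        · -- unknown entry: A tries 0-extensions first, then 1-extensions
          subst hx
          rw [show (((-1 : Int) :: ds).count (-1)) = ds.count (-1) + 1 from by simp]
          simp only [prodLists, List.flatMap_cons, List.flatMap_nil, List.append_nil]
          rw [List.find?_append, List.find?_map, List.find?_map]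
          have hp0 : ((fun a => checkA h (fill ((-1 : Int) :: ds) a) (li :: ls) (ri :: rs)) ∘ (fun a => (0 : Int) :: a))
              = fun a' => if li ≤ h ∧ h ≤ ri then checkA h (fill ds a') ls rs else false := by
            funext a'
            simp only [Function.comp, fill_cons_neg, checkA, add_zero]
          have hp1 : ((fun a => checkA h (fill ((-1 : Int) :: ds) a) (li :: ls) (ri :: rs)) ∘ (fun a => (1 : Int) :: a))
              = fun a' => if li ≤ h + 1 ∧ h + 1 ≤ ri then checkA (h + 1) (fill ds a') ls rs else false := by
            funext a'
            simp only [Function.comp, fill_cons_neg, checkA]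
          rw [hp0, hp1]
          -- a reusable fact: if value v is infeasible, the v-branch search fails
          have hfindv : ∀ (v : Int), ¬ (li ≤ h + v ∧ h + v ≤ ri ∧ inNext (h + v) rest = true) →
              (prodLists (ds.count (-1))).find? (fun a' => if li ≤ h + v ∧ h + v ≤ ri then checkA (h + v) (fill ds a') ls rs else false)
              = none := by
            intro v cv
            by_cases hbv : li ≤ h + v ∧ h + v ≤ ri
            · have hnn : inNext (h + v) rest = false := by
                cases hnn : inNext (h + v) rest
                · rfl
                · exact absurd ⟨hbv.1, hbv.2, hnn⟩ cv
              have hQ := ih' (h + v)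
              rw [hnn] at hQ
              simp only [Bool.false_eq_true, if_false] at hQ
              cases hfQ : (prodLists (ds.count (-1))).find? (fun a => checkA (h + v) (fill ds a) ls rs) with
              | none =>
                  have heq : (fun a' => if li ≤ h + v ∧ h + v ≤ ri then checkA (h + v) (fill ds a') ls rs else false)
                      = fun a' => checkA (h + v) (fill ds a') ls rs := by
                    funext a'; simp [hbv.1, hbv.2]
                  rw [heq, hfQ]
              | some a0 => rw [hfQ] at hQ; simp at hQ
            · apply List.find?_eq_none.2
              intro a _
              simp [hbv]
          -- a reusable fact: if value v is feasible, the v-branch search succeeds with the greedy tail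
          have hgoodv : ∀ (v : Int), (li ≤ h + v ∧ h + v ≤ ri ∧ inNext (h + v) rest = true) →
              ∃ a0, (prodLists (ds.count (-1))).find? (fun a' => if li ≤ h + v ∧ h + v ≤ ri then checkA (h + v) (fill ds a') ls rs else false)
                = some a0 ∧ fill ds a0 = forwardB (h + v) ds ls rs rest := by
            intro v cv
            have hQ := ih' (h + v)
            rw [if_pos cv.2.2] at hQ
            cases hfQ : (prodLists (ds.count (-1))).find? (fun a => checkA (h + v) (fill ds a) ls rs) with
            | none => rw [hfQ] at hQ; simp at hQ
            | some a0 =>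
                rw [hfQ] at hQ
                simp only [Option.map_some, Option.some.injEq] at hQ
                refine ⟨a0, ?_, hQ⟩
                have heq : (fun a' => if li ≤ h + v ∧ h + v ≤ ri then checkA (h + v) (fill ds a') ls rs else false)
                    = fun a' => checkA (h + v) (fill ds a') ls rs := by
                  funext a'; simp [cv.1, cv.2.1]
                rw [heq, hfQ]
          by_cases c0 : li ≤ h ∧ h ≤ ri ∧ inNext h rest = true
          · -- greedy takes 0
            obtain ⟨a0, ha0, hfa0⟩ := hgoodv 0 (by simpa using c0)
            simp only [add_zero] at ha0 hfa0
            rw [ha0]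
            have hmem : lo ≤ h ∧ h ≤ hi := (bnd h).2 c0
            have hgt : ¬ lo > hi := by omega
            have hnx : inNext h ((some (lo - 1, hi)) :: rest) = true := by
              simp only [inNext, decide_eq_true_eq]
              omega
            simp [hgt, hnx, forwardB, fill_cons_neg, hfa0, c0.1, c0.2.1, c0.2.2]
          · by_cases c1 : li ≤ h + 1 ∧ h + 1 ≤ ri ∧ inNext (h + 1) rest = true
            · -- greedy takes 1
              obtain ⟨a1, ha1, hfa1⟩ := hgoodv 1 c1
              have h0 := hfindv 0 (by simpa using c0)
              simp only [add_zero] at h0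
              rw [h0, ha1]
              have hmem : lo ≤ h + 1 ∧ h + 1 ≤ hi := (bnd (h + 1)).2 c1
              have hgt : ¬ lo > hi := by omega
              have hnx : inNext h ((some (lo - 1, hi)) :: rest) = true := by
                simp only [inNext, decide_eq_true_eq]
                omega
              simp [hgt, hnx, forwardB, fill_cons_neg, hfa1, c0]
            · -- infeasible: both branches fail and the interval excludes h
              have h0 := hfindv 0 (by simpa using c0)
              have h1 := hfindv 1 c1
              simp only [add_zero] at h0
              rw [h0, h1]
              have hnot0 : ¬ (lo ≤ h ∧ h ≤ hi) := fun hm => c0 ((bnd h).1 hm)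
              have hnot1 : ¬ (lo ≤ h + 1 ∧ h + 1 ≤ hi) := fun hm => c1 ((bnd (h + 1)).1 hm)
              by_cases hlh : lo > hi
              · simp [hlh, inNext]
              · have hnxf : inNext h ((some (lo - 1, hi)) :: rest) = false := by
                  simp only [inNext, decide_eq_false_iff_not]
                  omega
                simp [hlh, hnxf]
        · -- fixed entry
          rw [show ((x :: ds).count (-1)) = ds.count (-1) from by simp [List.count_cons, hx]]
          have hpred : (fun a => checkA h (fill (x :: ds) a) (li :: ls) (ri :: rs))
              = fun a => if li ≤ h + x ∧ h + x ≤ ri then checkA (h + x) (fill ds a) ls rs else false := by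
            funext a
            rw [fill_cons_ne x ds a hx]
            rfl
          have hfillx : fill (x :: ds) = fun a => x :: fill ds a := by
            funext a; exact fill_cons_ne x ds a hx
          rw [hpred, hfillx, map_cons_comm]
          by_cases hb : li ≤ h + x ∧ h + x ≤ ri
          · have heq : (fun a => if li ≤ h + x ∧ h + x ≤ ri then checkA (h + x) (fill ds a) ls rs else false)
                = fun a => checkA (h + x) (fill ds a) ls rs := by
              funext a; simp [hb.1, hb.2]
            rw [heq, ih' (h + x)]
            have hNextEq : inNext h ((if lo > hi then none
                else if x = -1 then some (lo - 1, hi) else some (lo - x, hi - x)) :: rest)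
                = inNext (h + x) rest := by
              by_cases hlh : lo > hi
              · rw [if_pos hlh]
                cases hnn : inNext (h + x) rest
                · simp [inNext]
                · have hm := (bnd (h + x)).2 ⟨hb.1, hb.2, hnn⟩
                  exact absurd hm (by omega)
              · rw [if_neg hlh, if_neg hx]
                cases hnn : inNext (h + x) rest
                · simp only [inNext, decide_eq_false_iff_not]
                  intro hm
                  have h2 := (bnd (h + x)).1 (by omega : lo ≤ h + x ∧ h + x ≤ hi)
                  rw [h2.2.2] at hnn
                  cases hnn
                · have hm := (bnd (h + x)).2 ⟨hb.1, hb.2, hnn⟩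
                  simp only [inNext, decide_eq_true_eq]
                  omega
            rw [hNextEq]
            cases hnn : inNext (h + x) rest
            · simp [hnn]
            · simp [hnn, forwardB, hx]
          · have hfnone : (prodLists (ds.count (-1))).find? (fun a => if li ≤ h + x ∧ h + x ≤ ri then checkA (h + x) (fill ds a) ls rs else false) = none := by
              apply List.find?_eq_none.2
              intro a _
              simp [hb]
            rw [hfnone]
            have hnxf : inNext h ((if lo > hi then none
                else if x = -1 then some (lo - 1, hi) else some (lo - x, hi - x)) :: rest) = false := by
              by_cases hlh : lo > hi
              · simp [hlh, inNext]
              · rw [if_neg hlh, if_neg hx]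
                simp only [inNext, decide_eq_false_iff_not]
                intro hm
                exact hb ⟨((bnd (h + x)).1 (by omega)).1, ((bnd (h + x)).1 (by omega)).2.1⟩
            simp [hnxf]

-- ===== VERDICT (by name: the statement is the Claim_ definition above) =====
theorem brute_solve_spec : Claim_equal_brute_solve := by
  intro d l r _ hpre
  unfold Spec_brute_solve brute_solve
  rw [tryAll_eq_find?, main_lemma d l r 0 hpre.1 hpre.2]
  unfold brute_solve_alt
  match d, l, r, hpre with
  | [], _, _, _ => simp [feasB, inNext, forwardB]
  | x :: ds, li :: ls, ri :: rs, _ =>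
      simp only [feasB]
      set rest := feasB ds ls rs
      cases hcur : (if ((match rest with
        | [] => (li, ri)
        | none :: _ => ((1:Int), (0:Int))
        | some (nlo, nhi) :: _ => (max li nlo, min ri nhi)) : Int × Int).1 >
          ((match rest with
        | [] => (li, ri)
        | none :: _ => ((1:Int), (0:Int))
        | some (nlo, nhi) :: _ => (max li nlo, min ri nhi)) : Int × Int).2 then none
        else if x = -1 then some (((match rest with
        | [] => (li, ri)
        | none :: _ => ((1:Int), (0:Int))
        | some (nlo, nhi) :: _ => (max li nlo, min ri nhi)) : Int × Int).1 - 1, ((match rest with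
        | [] => (li, ri)
        | none :: _ => ((1:Int), (0:Int))
        | some (nlo, nhi) :: _ => (max li nlo, min ri nhi)) : Int × Int).2)
        else some (((match rest with
        | [] => (li, ri)
        | none :: _ => ((1:Int), (0:Int))
        | some (nlo, nhi) :: _ => (max li nlo, min ri nhi)) : Int × Int).1 - x, ((match rest with
        | [] => (li, ri)
        | none :: _ => ((1:Int), (0:Int))
        | some (nlo, nhi) :: _ => (max li nlo, min ri nhi)) : Int × Int).2 - x)) with
      | none => simp [inNext]
      | some p => simp [inNext]
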